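-- pv_equiv track=rewrite | github.com/CBMW/AttackCastle | src/attackcastle/scope/compiler.py | classify_cloud_provider
-- ===== SOURCE A (Python) =====
-- CLOUD_SUFFIXES: dict[str, str] = {
--     "amazonaws.com": "aws",
--     "cloudfront.net": "aws",
--     "elb.amazonaws.com": "aws",
--     "azurewebsites.net": "azure",
--     "windows.net": "azure",
--     "cloudapp.azure.com": "azure",
--     "googleusercontent.com": "gcp",
--     "appspot.com": "gcp",
--     "run.app": "gcp",
--     "herokuapp.com": "heroku",
--     "vercel.app": "vercel",
--     "netlify.app": "netlify",
-- }
--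
-- def _canonical_domain(value: str | None) -> str | None:
--     if not value:
--         return None
--     return value.strip().lower().rstrip(".")
--
-- def classify_cloud_provider(host: str | None) -> str | None:
--     normalized = _canonical_domain(host)
--     if not normalized:
--         return None
--     for suffix, provider in CLOUD_SUFFIXES.items():
--         if normalized == suffix or normalized.endswith(f".{suffix}"):
--             return provider
--     return None
-- ===== SOURCE B (Python) =====
-- CLOUD_SUFFIXES: dict[str, str] = {
--     "amazonaws.com": "aws",
--     "cloudfront.net": "aws",
--     "elb.amazonaws.com": "aws",
--     "azurewebsites.net": "azure",
--     "windows.net": "azure",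
--     "cloudapp.azure.com": "azure",
--     "googleusercontent.com": "gcp",
--     "appspot.com": "gcp",
--     "run.app": "gcp",
--     "herokuapp.com": "heroku",
--     "vercel.app": "vercel",
--     "netlify.app": "netlify",
-- }
--
-- def _canonical_domain(value: str | None) -> str | None:
--     if not value:
--         return None
--     return value.strip().lower().rstrip(".")
--
-- def _lookup(normalized: str) -> str | None:
--     provider = CLOUD_SUFFIXES.get(normalized)
--     if provider is not None:
--         return provider
--     dot = normalized.find(".")
--     if dot < 0:
--         return None
--     return _lookup(normalized[dot + 1:])
--
-- def classify_cloud_provider(host: str | None) -> str | None: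
--     normalized = _canonical_domain(host)
--     if not normalized:
--         return None
--     return _lookup(normalized)
-- ===== Notes on version B (the rewrite author's own statement) =====
-- stated objective: alternative
-- what changed: Instead of scanning all 12 table entries with endswith, B splits the normalized host into labels and probes the suffix dict once per dotted suffix of the host (longest first), returning on the first hit; correct because the only nested pair of table keys maps to the same provider.
import Mathlib
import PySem

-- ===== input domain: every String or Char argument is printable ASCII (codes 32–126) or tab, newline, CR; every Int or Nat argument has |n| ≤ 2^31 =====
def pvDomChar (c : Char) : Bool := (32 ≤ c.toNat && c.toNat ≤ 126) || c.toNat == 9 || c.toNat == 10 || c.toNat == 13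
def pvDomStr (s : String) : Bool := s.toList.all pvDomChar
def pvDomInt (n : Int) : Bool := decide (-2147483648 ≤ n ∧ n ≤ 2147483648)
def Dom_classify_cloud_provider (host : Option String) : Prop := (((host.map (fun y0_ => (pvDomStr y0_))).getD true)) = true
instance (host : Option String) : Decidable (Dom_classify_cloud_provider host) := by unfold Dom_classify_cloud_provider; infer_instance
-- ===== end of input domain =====

-- B replaces A's scan of all 12 table entries with endswith by a walk over the host's own
-- dotted suffixes (recursing past the first '.'), probing the suffix dict once per suffix
-- (objective: alternative algorithm, same observable behaviour).

-- ===== PORT A =====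
-- CLOUD_SUFFIXES, in source (insertion) order
def pvCloudTable : List (List Char × String) :=
  [("amazonaws.com".toList, "aws"), ("cloudfront.net".toList, "aws"),
   ("elb.amazonaws.com".toList, "aws"), ("azurewebsites.net".toList, "azure"),
   ("windows.net".toList, "azure"), ("cloudapp.azure.com".toList, "azure"),
   ("googleusercontent.com".toList, "gcp"), ("appspot.com".toList, "gcp"),
   ("run.app".toList, "gcp"), ("herokuapp.com".toList, "heroku"),
   ("vercel.app".toList, "vercel"), ("netlify.app".toList, "netlify")]

-- Python str.rstrip("."): drop trailing '.' characters (hand port, exact: the chars set is {'.'})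
def pvRstripDot (cs : List Char) : List Char := ((cs.reverse).dropWhile (fun c => c == '.')).reverse

-- _canonical_domain (shared helper of both Python files)
def pvCanonical (value : Option String) : Option (List Char) :=
  match value with
  | none => none
  | some v =>
    if v.toList = [] then none
    else some (pvRstripDot (PySem.Chars.lower (PySem.Chars.strip v.toList)))

-- 'for suffix, provider in CLOUD_SUFFIXES.items(): if normalized == suffix or normalized.endswith("." + suffix): return provider'
def pvALoop : List (List Char × String) → List Char → Option String
  | [], _ => none
  | (suffix, provider) :: rest, n =>
    if n == suffix || PySem.Chars.endswith n ('.' :: suffix) then some provider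
    else pvALoop rest n

def classify_cloud_provider (host : Option String) : Option String :=
  match pvCanonical host with
  | none => none
  | some n => if n = [] then none else pvALoop pvCloudTable n

-- ===== PORT B =====
def pvCloudDict : PySem.Dict (List Char) String := PySem.Dict.ofList pvCloudTable

-- _lookup: probe the dict with the current suffix; on a miss recurse past the first '.'
def pvBLookup (n : List Char) : Option String :=
  match pvCloudDict.get? n with
  | some provider => some provider
  | none =>
    let dot := PySem.Chars.find n ['.']
    if h : dot < 0 then none
    else pvBLookup (PySem.List.slice n (some (dot + 1)) none)
termination_by n.length
decreasing_by
  have h0 : (0:Int) ≤ PySem.Chars.find n ['.'] := by omega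
  have hs := (PySem.Chars.find_spec (s := n) (sub := ['.']) h0).1
  have hlen := hs.length_le
  simp only [List.length_drop, List.length_cons, List.length_nil] at hlen
  rw [PySem.List.slice_from _ (by omega)]
  simp only [List.length_drop]
  omega

def classify_cloud_provider_alt (host : Option String) : Option String :=
  match pvCanonical host with
  | none => none
  | some n => if n = [] then none else pvBLookup n

-- ===== PRECONDITION & SPEC =====
def Spec_classify_cloud_provider (host : Option String) (out : Option String) : Prop := out = classify_cloud_provider_alt host
instance (host : Option String) (out : Option String) : Decidable (Spec_classify_cloud_provider host out) := by unfold Spec_classify_cloud_provider; infer_instance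

-- ===== CLAIM (what is proved, stated in full; the proofs are below) =====
def Claim_equal_classify_cloud_provider : Prop := ∀ (host : Option String), Dom_classify_cloud_provider host → Spec_classify_cloud_provider host (classify_cloud_provider host)

-- ===== LEMMAS AND PROOFS =====

-- A's loop condition, as a proposition
theorem pvCond_iff (n k : List Char) :
    (n == k || PySem.Chars.endswith n ('.' :: k)) = true ↔ (n = k ∨ ('.' :: k) <:+ n) := by
  simp [PySem.Chars.endswith_iff]

-- the table's providers agree on any two keys one of which is a dotted suffix of the other
theorem pvTable_chain : ∀ p ∈ pvCloudTable, ∀ q ∈ pvCloudTable,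
    (p.1 = q.1 ∨ ('.' :: p.1) <:+ q.1 ∨ ('.' :: q.1) <:+ p.1) → p.2 = q.2 := by decide

-- every table key is found by the dict
theorem pvTable_get : ∀ p ∈ pvCloudTable, pvCloudDict.get? p.1 = some p.2 := by decide

theorem pvDict_eq_mk : pvCloudDict = PySem.Dict.mk pvCloudTable := by decide

theorem pvGet_mk_mem {n : List Char} {p : String} :
    ∀ {l : List (List Char × String)}, (PySem.Dict.mk l).get? n = some p → (n, p) ∈ l := by
  intro l
  induction l with
  | nil => intro h; simp [PySem.Dict.get?] at h
  | cons kv rest ih =>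
    obtain ⟨k, v⟩ := kv
    rw [PySem.Dict.get?_mk_cons]
    intro h
    by_cases hk : (k == n) = true
    · rw [if_pos hk] at h
      simp at hk h
      simp [hk, h]
    · rw [if_neg hk] at h
      exact List.mem_cons_of_mem _ (ih h)

theorem pvALoop_none {n : List Char} {T : List (List Char × String)}
    (h : ∀ p ∈ T, (n == p.1 || PySem.Chars.endswith n ('.' :: p.1)) = false) :
    pvALoop T n = none := by
  induction T with
  | nil => rfl
  | cons kv rest ih =>
    obtain ⟨k, v⟩ := kv
    have hk := h (k, v) (List.mem_cons_self ..)
    simp only [pvALoop, hk]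
    exact ih (fun p hp => h p (List.mem_cons_of_mem _ hp))

theorem pvALoop_some {n k : List Char} {v : String} {T : List (List Char × String)}
    (hmem : (k, v) ∈ T)
    (hk : (n == k || PySem.Chars.endswith n ('.' :: k)) = true)
    (huniq : ∀ p ∈ T, (n == p.1 || PySem.Chars.endswith n ('.' :: p.1)) = true → p.2 = v) :
    pvALoop T n = some v := by
  induction T with
  | nil => cases hmem
  | cons kv rest ih =>
    obtain ⟨k0, v0⟩ := kv
    by_cases h0 : (n == k0 || PySem.Chars.endswith n ('.' :: k0)) = true
    · simp only [pvALoop, h0, if_true]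
      exact congrArg some (huniq (k0, v0) (List.mem_cons_self ..) h0)
    · simp only [pvALoop, h0]
      rcases List.mem_cons.mp hmem with heq | hmem'
      · cases heq; exact absurd hk h0
      · exact ih hmem' (fun p hp => huniq p (List.mem_cons_of_mem _ hp))

theorem pvALoop_congr {n m : List Char} {T : List (List Char × String)}
    (h : ∀ p ∈ T, (n == p.1 || PySem.Chars.endswith n ('.' :: p.1))
                = (m == p.1 || PySem.Chars.endswith m ('.' :: p.1))) :
    pvALoop T n = pvALoop T m := by
  induction T with
  | nil => rfl
  | cons kv rest ih =>
    obtain ⟨k, v⟩ := kv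
    simp only [pvALoop, h (k, v) (List.mem_cons_self ..)]
    split
    · rfl
    · exact ih (fun p hp => h p (List.mem_cons_of_mem _ hp))

-- a dotted suffix of x ++ '.' :: R, with x dot-free, is R itself or a dotted suffix of R
theorem pvDotSuffix_split {x R k : List Char} (hx : '.' ∉ x) :
    ('.' :: k) <:+ (x ++ '.' :: R) ↔ (k = R ∨ ('.' :: k) <:+ R) := by
  constructor
  · rintro ⟨u, hu⟩
    rcases List.append_eq_append_iff.mp hu with ⟨as, hxa, hka⟩ | ⟨bs, hub, hRb⟩
    · cases as with
      | nil => simp at hka; exact Or.inl hka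
      | cons a t =>
        have ha : a = '.' := by
          have := hka; simp at this; exact this.1.symm
        exact absurd (hxa ▸ List.mem_append_right u (ha ▸ List.mem_cons_self ..)) hx
    · cases bs with
      | nil => simp at hRb; exact Or.inl hRb.symm
      | cons b t =>
        have : R = t ++ '.' :: k := by
          have := hRb; simp at this; exact this.2
        exact Or.inr ⟨t, this.symm⟩
  · rintro (rfl | h)
    · exact ⟨x, rfl⟩
    · exact h.trans ((List.suffix_cons '.' R).trans (List.suffix_append x _))

-- two keys matching the same string are equal or nested dotted suffixes
theorem pvMatches_rel {n a b : List Char}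
    (ha : n = a ∨ ('.' :: a) <:+ n) (hb : n = b ∨ ('.' :: b) <:+ n) :
    a = b ∨ ('.' :: a) <:+ b ∨ ('.' :: b) <:+ a := by
  rcases ha with rfl | ha <;> rcases hb with hb | hb
  · exact Or.inl hb
  · exact Or.inr (Or.inr hb)
  · exact Or.inr (Or.inl (hb ▸ ha))
  · rcases List.suffix_or_suffix_of_suffix ha hb with h | h
    · rcases List.suffix_cons_iff.mp h with h' | h'
      · exact Or.inl (by injection h')
      · exact Or.inr (Or.inl h')
    · rcases List.suffix_cons_iff.mp h with h' | h'
      · exact Or.inl (by injection h' with _ h2; exact h2.symm)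
      · exact Or.inr (Or.inr h')

theorem pvInfix_singleton {c : Char} {n : List Char} : [c] <:+: n ↔ c ∈ n := by
  constructor
  · rintro ⟨s, t, rfl⟩; simp
  · intro h
    obtain ⟨s, t, rfl⟩ := List.append_of_mem h
    exact ⟨s, t, by simp⟩

-- MAIN: A's table scan and B's suffix walk agree on every normalized string
theorem pvMain : ∀ n : List Char, pvALoop pvCloudTable n = pvBLookup n := by
  intro n
  induction hl : n.length using Nat.strong_induction_on generalizing n with
  | _ len ih =>
  subst hl
  rw [pvBLookup]
  cases hg : pvCloudDict.get? n with
  | some p =>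
    have hmem : (n, p) ∈ pvCloudTable := pvGet_mk_mem (pvDict_eq_mk ▸ hg)
    refine pvALoop_some hmem ((pvCond_iff n n).mpr (Or.inl rfl)) ?_
    intro q hq hcond
    have hrel := pvMatches_rel (Or.inl rfl) ((pvCond_iff n q.1).mp hcond)
    have hrel' : q.1 = (n, p).1 ∨ ('.' :: q.1) <:+ (n, p).1 ∨ ('.' :: (n, p).1) <:+ q.1 := by
      rcases hrel with h | h | h
      · exact Or.inl h.symm
      · exact Or.inr (Or.inr h)
      · exact Or.inr (Or.inl h)
    exact pvTable_chain q hq (n, p) hmem hrel'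
  | none =>
    have hne : ∀ p ∈ pvCloudTable, n ≠ p.1 := by
      intro p hp heq
      rw [heq] at hg
      rw [pvTable_get p hp] at hg
      cases hg
    by_cases hd : PySem.Chars.find n ['.'] < 0
    · rw [dif_pos hd]
      have hdm1 : PySem.Chars.find n ['.'] = -1 := by
        have := PySem.Chars.neg_one_le_find n ['.']; omega
      have hnodot : '.' ∉ n := by
        intro hmem
        exact ((PySem.Chars.find_eq_neg_one_iff n ['.']).mp hdm1) (pvInfix_singleton.mpr hmem)
      apply pvALoop_none
      intro p hp
      rw [Bool.eq_false_iff]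
      intro hcond
      rcases (pvCond_iff n p.1).mp hcond with heq | hsuf
      · exact hne p hp heq
      · exact hnodot (hsuf.mem (List.mem_cons_self ..))
    · rw [dif_neg hd]
      have h0 : (0:Int) ≤ PySem.Chars.find n ['.'] := by omega
      set d := (PySem.Chars.find n ['.']).toNat with hdd
      have hspec := PySem.Chars.find_spec (s := n) (sub := ['.']) h0
      obtain ⟨t, ht⟩ := hspec.1
      have hdrop : n.drop d = '.' :: t := by rw [← ht]; rfl
      have hlen : n.length - d = t.length + 1 := by
        have := congrArg List.length hdrop; simpa using this
      have htR : n.drop (d + 1) = t := by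
        rw [← List.tail_drop, hdrop]; simp
      have hsplit : n = n.take d ++ '.' :: t := by
        conv_lhs => rw [← List.take_append_drop d n]
        rw [hdrop]
      have hxnodot : '.' ∉ n.take d := by
        intro hmem
        obtain ⟨i, hi, hget⟩ := List.mem_iff_getElem.mp hmem
        have hi' : i < d ∧ i < n.length := by simpa using hi
        apply hspec.2 i hi'.1
        rw [List.drop_eq_getElem_cons hi'.2]
        have hni : n[i] = '.' := by
          rw [← hget]; simp
        rw [hni]
        exact ⟨n.drop (i + 1), rfl⟩
      have hslice : PySem.List.slice n (some (PySem.Chars.find n ['.'] + 1)) none = t := by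
        rw [PySem.List.slice_from n (by omega)]
        rw [← htR]
        congr 1
        omega
      rw [hslice]
      have hIH : pvALoop pvCloudTable t = pvBLookup t := by
        apply ih t.length (by omega) t rfl
      rw [← hIH]
      apply pvALoop_congr
      intro p hp
      rw [Bool.eq_iff_iff, pvCond_iff, pvCond_iff]
      constructor
      · rintro (heq | hsuf)
        · exact absurd heq (hne p hp)
        · rw [hsplit] at hsuf
          rcases (pvDotSuffix_split hxnodot).mp hsuf with h | h
          · exact Or.inl h.symm
          · exact Or.inr h
      · rintro (heq | hsuf)
        · refine Or.inr ?_
          rw [hsplit]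
          exact (pvDotSuffix_split hxnodot).mpr (Or.inl heq.symm)
        · refine Or.inr ?_
          rw [hsplit]
          exact (pvDotSuffix_split hxnodot).mpr (Or.inr hsuf)

-- ===== VERDICT (by name: the statement is the Claim_ definition above) =====
theorem classify_cloud_provider_spec : Claim_equal_classify_cloud_provider := by
  intro host _
  unfold Spec_classify_cloud_provider classify_cloud_provider classify_cloud_provider_alt
  cases pvCanonical host with
  | none => rfl
  | some n =>
    by_cases hn : n = []
    · simp [hn]
    · simp only [hn, if_false]
      exact pvMain n
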